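-- pv_equiv track=rewrite | github.com/LaBravel/Tedu-code | python_base/weekly test02/6.py | year
-- ===== SOURCE A (Python) =====
-- def year(z) :
--     x = 0
--     for z in range(1,z) :
--         if (z % 400 == 0) or (z % 4 == 0 and z % 100 != 0) :
--             x += 366
--         else :
--             x += 365
--     return x
-- ===== SOURCE B (Python) =====
-- def year(z):
--     n = z - 1
--     if n <= 0:
--         return 0
--     return 365 * n + n // 4 - n // 100 + n // 400
-- ===== Notes on version B (the rewrite author's own statement) =====
-- stated objective: faster
-- what changed: Replaces the per-year loop with the closed-form day count 365*(z-1) plus the leap-year count (z-1)//4 - (z-1)//100 + (z-1)//400.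
import Mathlib
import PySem

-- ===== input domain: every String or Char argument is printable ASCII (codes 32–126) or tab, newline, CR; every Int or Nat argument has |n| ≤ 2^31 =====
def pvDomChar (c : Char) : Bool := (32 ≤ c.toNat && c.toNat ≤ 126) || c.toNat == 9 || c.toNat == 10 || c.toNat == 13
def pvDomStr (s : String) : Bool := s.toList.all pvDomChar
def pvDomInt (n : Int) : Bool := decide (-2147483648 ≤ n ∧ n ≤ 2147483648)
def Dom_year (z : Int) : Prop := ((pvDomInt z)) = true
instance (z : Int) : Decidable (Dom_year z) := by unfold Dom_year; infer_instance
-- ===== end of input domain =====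

-- B replaces A's per-year loop by the closed-form count 365*(z-1) + leap years via floor divisions (faster, O(1)).

-- ===== PORT A =====
def year (z : Int) : Int :=
  (PySem.List.pyRange 1 z 1).foldl
    (fun x y =>
      if PySem.Int.mod y 400 = 0 ∨ (PySem.Int.mod y 4 = 0 ∧ PySem.Int.mod y 100 ≠ 0) then
        x + 366
      else
        x + 365)
    0

-- ===== PORT B =====
def year_alt (z : Int) : Int :=
  let n := z - 1
  if n ≤ 0 then 0
  else 365 * n + PySem.Int.floordiv n 4 - PySem.Int.floordiv n 100 + PySem.Int.floordiv n 400

-- ===== PRECONDITION & SPEC =====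
def Spec_year (z : Int) (out : Int) : Prop := out = year_alt z
instance (z : Int) (out : Int) : Decidable (Spec_year z out) := by unfold Spec_year; infer_instance

-- ===== CLAIM (what is proved, stated in full; the proofs are below) =====
def Claim_equal_year : Prop := ∀ (z : Int), Dom_year z → Spec_year z (year z)

-- ===== LEMMAS AND PROOFS =====

-- A's loop over years 1..n sums to the closed form (Nat induction on n).
lemma year_loop (n : Nat) :
    year ((n : Int) + 1) =
      365 * (n : Int) + ((n / 4 : Nat) : Int) - ((n / 100 : Nat) : Int) + ((n / 400 : Nat) : Int) := by
  induction n with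
  | zero =>
      have h0 : ((0:Nat):Int) + 1 = 1 := by norm_num
      rw [h0]
      rw [show year 1 = (PySem.List.pyRange 1 1 1).foldl _ 0 from rfl,
        PySem.List.pyRange_one_eq_nil (le_refl (1:Int))]
      norm_num
  | succ m ih =>
      have h : PySem.List.pyRange 1 ((m : Int) + 1 + 1) 1
          = PySem.List.pyRange 1 ((m : Int) + 1) 1 ++ [(m : Int) + 1] :=
        PySem.List.pyRange_one_succ_right (by omega)
      have hc : ((m + 1 : Nat) : Int) + 1 = ((m : Int) + 1) + 1 := by push_cast; ring
      rw [hc]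
      unfold year at ih ⊢
      rw [h, List.foldl_append, ih]
      simp only [List.foldl_cons, List.foldl_nil,
        PySem.Int.mod_eq_emod_of_pos (show (0:Int) < 400 by norm_num),
        PySem.Int.mod_eq_emod_of_pos (show (0:Int) < 4 by norm_num),
        PySem.Int.mod_eq_emod_of_pos (show (0:Int) < 100 by norm_num)]
      split_ifs with hif
      · omega
      · omega

-- ===== VERDICT (by name: the statement is the Claim_ definition above) =====
theorem year_spec : Claim_equal_year := by
  intro z _
  unfold Spec_year year_alt
  by_cases hz : z - 1 ≤ 0
  · simp only [hz, if_true]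
    unfold year
    rw [PySem.List.pyRange_one_eq_nil (by omega)]
    rfl
  · simp only [hz, if_false]
    obtain ⟨n, hn⟩ : ∃ n : Nat, z = (n : Int) + 1 := ⟨(z - 1).toNat, by omega⟩
    subst hn
    rw [year_loop]
    rw [PySem.Int.floordiv_eq_ediv_of_pos (show (0:Int) < 4 by norm_num),
      PySem.Int.floordiv_eq_ediv_of_pos (show (0:Int) < 100 by norm_num),
      PySem.Int.floordiv_eq_ediv_of_pos (show (0:Int) < 400 by norm_num)]
    omega
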